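-- pv_equiv track=rewrite | github.com/rohanraaj2/Programming-Fundamentals | Hw 3/8.py | arrangement
-- ===== SOURCE A (Python) =====
-- def arrangement(letters):
--     n = ""
--     s = ""
--     for x in letters:
--         if x.upper() not in n.upper():
--             n += x
--     n = n.upper()
--     if len(n) > 3:
--         for i in n:
--             for j in n:
--                 if j != i:
--                     for k in n:
--                         if k != i and k != j:
--                             for l in n:
--                                 if l != i and l != j and l != k:
--                                     c = i+j+k+l
--                                     if c not in s:
--                                         s += (c + ",")
--         return s
--     else:
--         return ""
-- ===== SOURCE B (Python) =====
-- def arrangement(letters):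
--     n = ""
--     for x in letters:
--         if x.upper() not in n.upper():
--             n += x
--     n = n.upper()
--     if len(n) <= 3:
--         return ""
--
--     def go(s, prefix, avail):
--         if len(prefix) >= 4:
--             if prefix not in s:
--                 s += prefix + ","
--             return s
--         for c in avail:
--             s = go(s, prefix + c, [d for d in avail if d != c])
--         return s
--
--     return go("", "", list(n))
-- ===== Notes on version B (the rewrite author's own statement) =====
-- stated objective: alternative
-- what changed: The four hard-coded nested loops with their pairwise inequality guards are replaced by a recursive backtracking helper that threads the result string and, at each level, extends the current prefix with one letter and recurses on the remaining filtered letters, emitting the prefix plus separator at depth 4; the dedup/uppercase preamble, the length guard and A's substring-based duplicate-suppression check are preserved.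
import Mathlib
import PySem

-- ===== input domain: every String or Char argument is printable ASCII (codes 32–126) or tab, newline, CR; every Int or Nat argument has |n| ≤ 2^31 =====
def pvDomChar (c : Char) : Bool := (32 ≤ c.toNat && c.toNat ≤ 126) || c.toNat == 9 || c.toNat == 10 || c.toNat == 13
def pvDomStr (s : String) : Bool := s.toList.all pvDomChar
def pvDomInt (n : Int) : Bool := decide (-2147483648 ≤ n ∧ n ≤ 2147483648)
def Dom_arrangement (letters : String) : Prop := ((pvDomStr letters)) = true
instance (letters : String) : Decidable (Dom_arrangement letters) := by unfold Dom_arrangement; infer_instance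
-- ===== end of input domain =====

-- B replaces A's four nested loops by a recursive backtracking helper over the remaining
-- letters (same dedup preamble, guard and duplicate-suppression check); objective: alternative.

-- ===== PORT A =====
def arrangement (letters : String) : String :=
  -- n = ""; for x in letters: if x.upper() not in n.upper(): n += x; n = n.upper()
  let n0 : List Char := letters.toList.foldl
    (fun n x => if !(PySem.Chars.isIn (PySem.Chars.upper [x]) (PySem.Chars.upper n)) then n ++ [x] else n) []
  let n : List Char := PySem.Chars.upper n0
  if n.length > 3 then
    String.ofList (n.foldl (fun s i =>
      n.foldl (fun s j =>
        if j ≠ i then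
          n.foldl (fun s k =>
            if k ≠ i ∧ k ≠ j then
              n.foldl (fun s l =>
                if l ≠ i ∧ l ≠ j ∧ l ≠ k then
                  -- c = i+j+k+l; if c not in s: s += (c + ",")
                  (if !(PySem.Chars.isIn ([i] ++ [j] ++ [k] ++ [l]) s) then s ++ ([i] ++ [j] ++ [k] ++ [l]) ++ [','] else s)
                else s) s
            else s) s
        else s) s) [])
  else ""

-- ===== PORT B =====
-- def go(s, prefix, avail): recursive backtracking helper of Source B
def bGo (s pre avail : List Char) : List Char :=
  if h : 4 ≤ pre.length then
    (if !(PySem.Chars.isIn pre s) then s ++ pre ++ [','] else s)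
  else
    avail.foldl (fun s c => bGo s (pre ++ [c]) (avail.filter (fun d => d ≠ c))) s
termination_by 4 - pre.length
decreasing_by simp only [List.length_append, List.length_cons, List.length_nil]; omega

def arrangement_alt (letters : String) : String :=
  let n0 : List Char := letters.toList.foldl
    (fun n x => if !(PySem.Chars.isIn (PySem.Chars.upper [x]) (PySem.Chars.upper n)) then n ++ [x] else n) []
  let n : List Char := PySem.Chars.upper n0
  if n.length ≤ 3 then ""
  else String.ofList (bGo [] [] n)

-- ===== PRECONDITION & SPEC =====
def Spec_arrangement (letters : String) (out : String) : Prop := out = arrangement_alt letters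
instance (letters : String) (out : String) : Decidable (Spec_arrangement letters out) := by unfold Spec_arrangement; infer_instance

-- ===== CLAIM (what is proved, stated in full; the proofs are below) =====
def Claim_equal_arrangement : Prop := ∀ (letters : String), Dom_arrangement letters → Spec_arrangement letters (arrangement letters)

-- ===== LEMMAS AND PROOFS =====

theorem bGo_four (s pre a : List Char) (h : 4 ≤ pre.length) :
    bGo s pre a = (if !(PySem.Chars.isIn pre s) then s ++ pre ++ [','] else s) := by
  rw [bGo]; simp [h]

theorem bGo_step (s pre a : List Char) (h : ¬ 4 ≤ pre.length) :
    bGo s pre a = a.foldl (fun s c => bGo s (pre ++ [c]) (a.filter (fun d => d ≠ c))) s := by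
  rw [bGo]; simp [h]

-- core: B's recursion from the empty prefix equals A's four nested loops, for any list n
theorem core (n s : List Char) :
    bGo s [] n =
      n.foldl (fun s i =>
        n.foldl (fun s j =>
          if j ≠ i then
            n.foldl (fun s k =>
              if k ≠ i ∧ k ≠ j then
                n.foldl (fun s l =>
                  if l ≠ i ∧ l ≠ j ∧ l ≠ k then
                    (if !(PySem.Chars.isIn ([i] ++ [j] ++ [k] ++ [l]) s) then s ++ ([i] ++ [j] ++ [k] ++ [l]) ++ [','] else s)
                  else s) s
              else s) s
          else s) s) s := by
  rw [bGo_step _ _ _ (by simp)]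
  apply List.foldl_ext
  intro s i hi
  simp only [List.nil_append]
  rw [bGo_step _ _ _ (by simp), List.foldl_filter]
  apply List.foldl_ext
  intro s j hj
  by_cases hji : j = i
  · simp [hji]
  · simp only [hji, decide_not, Bool.not_eq_true', ne_eq, not_false_eq_true, if_pos]
    rw [bGo_step _ _ _ (by simp), List.foldl_filter, List.foldl_filter]
    apply List.foldl_ext
    intro s k hk
    by_cases hki : k = i
    · simp [hki]
    by_cases hkj : k = j
    · simp [hkj]
    simp only [hki, hkj, ne_eq, not_false_eq_true, and_self, if_pos, decide_not,
      Bool.not_eq_true', decide_eq_false_iff_not]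
    rw [bGo_step _ _ _ (by simp), List.foldl_filter, List.foldl_filter, List.foldl_filter]
    apply List.foldl_ext
    intro s l hl
    by_cases hli : l = i
    · simp [hli]
    by_cases hlj : l = j
    · simp [hlj]
    by_cases hlk : l = k
    · simp [hlk]
    simp only [hli, hlj, hlk, ne_eq, not_false_eq_true, and_self, if_pos, decide_not,
      Bool.not_eq_true', decide_eq_false_iff_not]
    rw [bGo_four _ _ _ (by simp)]
    simp

theorem guard_join (n : List Char) :
    (if n.length > 3 then
      String.ofList (n.foldl (fun s i =>
        n.foldl (fun s j =>
          if j ≠ i then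
            n.foldl (fun s k =>
              if k ≠ i ∧ k ≠ j then
                n.foldl (fun s l =>
                  if l ≠ i ∧ l ≠ j ∧ l ≠ k then
                    (if !(PySem.Chars.isIn ([i] ++ [j] ++ [k] ++ [l]) s) then s ++ ([i] ++ [j] ++ [k] ++ [l]) ++ [','] else s)
                  else s) s
              else s) s
          else s) s) [])
    else "") = (if n.length ≤ 3 then "" else String.ofList (bGo [] [] n)) := by
  rcases Nat.lt_or_ge 3 n.length with h | h
  · rw [if_pos h, if_neg (by omega)]
    exact congrArg String.ofList (core n []).symm
  · rw [if_neg (by omega), if_pos (by omega)]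

-- ===== VERDICT (by name: the statement is the Claim_ definition above) =====
theorem arrangement_spec : Claim_equal_arrangement := by
  intro letters _
  unfold Spec_arrangement arrangement arrangement_alt
  exact (guard_join (PySem.Chars.upper (letters.toList.foldl
    (fun n x => if !(PySem.Chars.isIn (PySem.Chars.upper [x]) (PySem.Chars.upper n)) then n ++ [x] else n) [])))
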